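-- pv_equiv track=rewrite | github.com/olekmt/sym_so_v1 | classes/SJF.py | find_waiting_time
-- ===== SOURCE A (Python) =====
-- def find_waiting_time(processes, n):
--     service_time = [0]*n
--     service_time[0] = 0
--     processes[0][4] = 0
--
--     for i in range(1, n):
--         service_time[i] = (service_time[i-1] + processes[i-1][1])
--
--         processes[i][4] = service_time[i] - processes[i][2]
--
--     return processes
-- ===== SOURCE B (Python) =====
-- def find_waiting_time(processes, n):
--     processes[0][4] = 0
--     for i in range(1, n):
--         processes[i][4] = sum(row[1] for row in processes[:i]) - processes[i][2]
--     return processes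
-- ===== Notes on version B (the rewrite author's own statement) =====
-- stated objective: simpler
-- what changed: Drops A's service_time table entirely: each waiting time is computed directly from its definition as the sum of all earlier burst times minus the arrival column, so there is no carried running-sum state (at O(n^2) cost instead of O(n)).
import Mathlib
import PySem

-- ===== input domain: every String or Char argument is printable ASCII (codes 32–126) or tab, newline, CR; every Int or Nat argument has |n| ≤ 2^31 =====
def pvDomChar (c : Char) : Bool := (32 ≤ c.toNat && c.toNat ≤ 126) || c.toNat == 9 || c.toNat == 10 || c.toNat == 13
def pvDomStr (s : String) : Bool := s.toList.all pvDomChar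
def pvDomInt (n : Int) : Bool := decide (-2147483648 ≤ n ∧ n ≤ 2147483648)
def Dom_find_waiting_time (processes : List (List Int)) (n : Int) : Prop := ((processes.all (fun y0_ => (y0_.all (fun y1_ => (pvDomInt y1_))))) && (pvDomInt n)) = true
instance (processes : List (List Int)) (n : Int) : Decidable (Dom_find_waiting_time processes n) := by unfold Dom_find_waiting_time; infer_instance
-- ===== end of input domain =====

-- B drops A's service_time table: each waiting time is computed directly from its
-- definition (sum of all earlier bursts minus the arrival column), carrying no running
-- state; simpler but O(n^2). A mutates `processes` in place; the equivalence proved here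
-- is about the RETURN value (B performs the same in-place mutation in Python).

-- ===== PORT A =====
-- one iteration of A's loop body; state = (service_time, processes)
def fwtStepA (st : List Int × List (List Int)) (i : Int) : List Int × List (List Int) :=
  let v := PySem.List.pyGetD st.1 (i - 1) 0 +
           PySem.List.pyGetD (PySem.List.pyGetD st.2 (i - 1) []) 1 0
  let sv := PySem.List.pySetD st.1 i v
  let row := PySem.List.pyGetD st.2 i []
  (sv, PySem.List.pySetD st.2 i (PySem.List.pySetD row 4 (v - PySem.List.pyGetD row 2 0)))

def find_waiting_time (processes : List (List Int)) (n : Int) : List (List Int) :=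
  let service_time : List Int := List.replicate n.toNat 0      -- [0]*n
  let service_time := PySem.List.pySetD service_time 0 0       -- service_time[0] = 0
  let processes := PySem.List.pySetD processes 0
    (PySem.List.pySetD (PySem.List.pyGetD processes 0 []) 4 0) -- processes[0][4] = 0
  ((PySem.List.pyRange 1 n 1).foldl fwtStepA (service_time, processes)).2

-- ===== PORT B =====
-- one iteration of B's loop: processes[i][4] = sum(row[1] for row in processes[:i]) - processes[i][2]
def fwtStepB (ps : List (List Int)) (i : Int) : List (List Int) :=
  let s := ((PySem.List.slice ps none (some i)).map (fun row => PySem.List.pyGetD row 1 0)).sum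
  let row := PySem.List.pyGetD ps i []
  PySem.List.pySetD ps i (PySem.List.pySetD row 4 (s - PySem.List.pyGetD row 2 0))

def find_waiting_time_alt (processes : List (List Int)) (n : Int) : List (List Int) :=
  let processes := PySem.List.pySetD processes 0
    (PySem.List.pySetD (PySem.List.pyGetD processes 0 []) 4 0) -- processes[0][4] = 0
  (PySem.List.pyRange 1 n 1).foldl fwtStepB processes

-- ===== PRECONDITION & SPEC =====
-- Pre_ = exactly the inputs where Python A returns: it needs n ≥ 1 (service_time[0]),
-- indexes rows 0..n-1 and assigns index 4 of each, so those rows must exist with length ≥ 5.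
def Pre_find_waiting_time (processes : List (List Int)) (n : Int) : Prop :=
  1 ≤ n ∧ n ≤ processes.length ∧ ∀ row ∈ processes.take n.toNat, 5 ≤ row.length
instance (processes : List (List Int)) (n : Int) : Decidable (Pre_find_waiting_time processes n) := by
  unfold Pre_find_waiting_time; infer_instance

def pvWitness_find_waiting_time : List (List Int) × Int :=
  ([[2, 3, 1, 0, 0], [1, 4, 2, 0, 0]], 2)

def Spec_find_waiting_time (processes : List (List Int)) (n : Int) (out : List (List Int)) : Prop := out = find_waiting_time_alt processes n
instance (processes : List (List Int)) (n : Int) (out : List (List Int)) : Decidable (Spec_find_waiting_time processes n out) := by unfold Spec_find_waiting_time; infer_instance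

-- ===== CLAIM (what is proved, stated in full; the proofs are below) =====
def Claim_equal_find_waiting_time : Prop := ∀ (processes : List (List Int)) (n : Int), Dom_find_waiting_time processes n → Pre_find_waiting_time processes n → Spec_find_waiting_time processes n (find_waiting_time processes n)

-- ===== LEMMAS AND PROOFS =====

-- `getD` through `set` at another index / at the written index
theorem fwt_getD_set_ne {α : Type} (xs : List α) (a b : Nat) (v d : α) (h : b ≠ a) :
    (xs.set a v).getD b d = xs.getD b d := by
  simp [List.getD, List.getElem?_set_ne (Ne.symm h)]

theorem fwt_getD_set_self {α : Type} (xs : List α) (a : Nat) (v d : α) (h : a < xs.length) :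
    (xs.set a v).getD a d = v := by
  simp [List.getD, h]

-- writing index 4 of a row leaves its entries 1 and 2 unchanged
theorem fwt_row_col {α : Type} (row : List α) (b : Nat) (v d : α) (hb : b ≠ 4) :
    PySem.List.pyGetD (PySem.List.pySetD row 4 v) (b : Int) d = PySem.List.pyGetD row (b : Int) d := by
  have h4 : (4 : Int) = ((4 : Nat) : Int) := by norm_num
  rw [h4, PySem.List.pySetD_natCast, PySem.List.pyGetD_natCast, PySem.List.pyGetD_natCast]
  exact fwt_getD_set_ne _ _ _ _ _ hb

-- B's per-step sum over the current list equals the prefix sum of the original burst column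
theorem fwt_sumB (burst : List Int) (N : Nat) (hNb : burst.length = N)
    (ps : List (List Int)) (hps : N ≤ ps.length) (m : Nat) (hm : m ≤ N)
    (hcol : ∀ j : Nat, j < N →
      PySem.List.pyGetD (PySem.List.pyGetD ps (j : Int) []) 1 0 = PySem.List.pyGetD burst (j : Int) 0) :
    ((PySem.List.slice ps none (some ((m : Nat) : Int))).map
      (fun row => PySem.List.pyGetD row 1 0)).sum = (burst.take m).sum := by
  rw [PySem.List.slice_to_natCast]
  congr 1
  apply List.ext_getElem
  · simp; omega
  · intro j hj1 hj2
    have hjm : j < m := by simp [List.length_take] at hj2; omega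
    have hjN : j < N := by omega
    have hjp : j < ps.length := by omega
    have h := hcol j hjN
    simp only [PySem.List.pyGetD_natCast] at h
    rw [List.getD_eq_getElem _ _ hjp] at h
    rw [List.getD_eq_getElem _ _ (show j < burst.length by omega)] at h
    simp [List.getElem_map, List.getElem_take, h]

-- main simulation: A's fold (carrying the running service_time) and B's fold
-- (re-summing the burst column each step) write the same rows
theorem fwt_main (burst : List Int) (N : Nat) (hNb : burst.length = N) :
    ∀ (k m : Nat) (sv : List Int) (ps : List (List Int)),
      m + k = N → 1 ≤ m → sv.length = N → N ≤ ps.length →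
      PySem.List.pyGetD sv ((m : Int) - 1) 0 = (burst.take (m - 1)).sum →
      (∀ j : Nat, j < N →
        PySem.List.pyGetD (PySem.List.pyGetD ps (j : Int) []) 1 0 = PySem.List.pyGetD burst (j : Int) 0) →
      ((PySem.List.pyRange (m : Int) (N : Int) 1).foldl fwtStepA (sv, ps)).2
        = (PySem.List.pyRange (m : Int) (N : Int) 1).foldl fwtStepB ps := by
  intro k
  induction k with
  | zero =>
    intro m sv ps hmk _ _ _ _ _
    have : m = N := by omega
    subst this
    rw [PySem.List.pyRange_one_eq_nil (le_refl _)]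
    simp
  | succ k ih =>
    intro m sv ps hmk hm hsv hps hsvval hcol
    have hmN : (m : Int) < (N : Int) := by exact_mod_cast (by omega : m < N)
    rw [PySem.List.pyRange_one_cons hmN]
    simp only [List.foldl_cons]
    -- the value A computes at step m
    have hm1 : ((m : Int) - 1) = ((m - 1 : Nat) : Int) := by omega
    have hcolm1 : PySem.List.pyGetD (PySem.List.pyGetD ps ((m : Int) - 1) []) 1 0
        = PySem.List.pyGetD burst ((m : Int) - 1) 0 := by
      rw [hm1]; exact hcol (m - 1) (by omega)
    have hburst : PySem.List.pyGetD burst ((m : Int) - 1) 0 = burst.getD (m - 1) 0 := by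
      rw [hm1, PySem.List.pyGetD_natCast]
    have hvm : PySem.List.pyGetD sv ((m : Int) - 1) 0 +
        PySem.List.pyGetD (PySem.List.pyGetD ps ((m : Int) - 1) []) 1 0
        = (burst.take m).sum := by
      rw [hsvval, hcolm1, hburst]
      have hlt : m - 1 < burst.length := by omega
      have hm' : m = (m - 1) + 1 := by omega
      conv_rhs => rw [hm']
      rw [List.take_succ, List.getElem?_eq_getElem hlt, List.sum_append]
      simp [List.getD, List.getElem?_eq_getElem hlt]
    -- the value B computes at step m
    have hsumB := fwt_sumB burst N hNb ps hps m (by omega) hcol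
    -- both steps write the same updated list of rows
    have hApair : fwtStepA (sv, ps) (m : Int)
        = (PySem.List.pySetD sv (m : Int) (burst.take m).sum, fwtStepB ps (m : Int)) := by
      simp only [fwtStepA, fwtStepB, hvm, hsumB]
    rw [hApair]
    have hcast : (m : Int) + 1 = ((m + 1 : Nat) : Int) := by push_cast; ring
    rw [hcast]
    apply ih (m + 1)
    · omega
    · omega
    · simp [PySem.List.pySetD_natCast, hsv]
    · simp only [fwtStepB, PySem.List.pySetD_natCast, List.length_set]; exact hps
    · have hc2 : ((m + 1 : Nat) : Int) - 1 = ((m : Nat) : Int) := by push_cast; ring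
      rw [hc2, PySem.List.pySetD_natCast, PySem.List.pyGetD_natCast,
          fwt_getD_set_self _ _ _ _ (by omega)]
      simp
    · intro j hj2
      simp only [fwtStepB, PySem.List.pySetD_natCast, PySem.List.pyGetD_natCast]
      by_cases hjm : j = m
      · subst hjm
        rw [fwt_getD_set_self _ _ _ _ (by omega)]
        have h1 : (1 : Int) = ((1 : Nat) : Int) := by norm_num
        rw [h1, fwt_row_col _ _ _ _ (by omega)]
        have := hcol j hj2
        have h1' : ((1 : Nat) : Int) = (1 : Int) := by norm_num
        rw [h1']
        simpa [PySem.List.pyGetD_natCast] using this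
      · rw [fwt_getD_set_ne _ _ _ _ _ hjm]
        have := hcol j hj2
        simpa [PySem.List.pyGetD_natCast] using this

-- ===== VERDICT (by name: the statement is the Claim_ definition above) =====
theorem find_waiting_time_spec : Claim_equal_find_waiting_time := by
  intro processes n _ hpre
  obtain ⟨hn1, hnlen, hrows⟩ := hpre
  unfold Spec_find_waiting_time find_waiting_time find_waiting_time_alt
  lift n to ℕ using (by omega : (0:Int) ≤ n) with N
  have hN1 : 1 ≤ N := by exact_mod_cast hn1
  have hNlen : N ≤ processes.length := by exact_mod_cast hnlen
  simp only [Int.toNat_natCast]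
  have hps1len : (PySem.List.pySetD processes 0
      (PySem.List.pySetD (PySem.List.pyGetD processes 0 []) 4 0)).length = processes.length := by
    rw [PySem.List.pySetD_of_nonneg _ _ (by norm_num)]
    simp
  have h0c : (0 : Int) = ((0 : Nat) : Int) := by norm_num
  have main := fwt_main ((processes.take N).map (fun row => PySem.List.pyGetD row 1 0))
    N (by simp; omega)
    (N - 1) 1
    (PySem.List.pySetD (List.replicate N (0:Int)) 0 0)
    (PySem.List.pySetD processes 0 (PySem.List.pySetD (PySem.List.pyGetD processes 0 []) 4 0))
    (by omega) (le_refl 1)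
    (by rw [h0c, PySem.List.pySetD_natCast]; simp)
    (by rw [hps1len]; exact hNlen)
    (by -- service_time[0] = 0 = sum of the first 0 bursts
      have : ((1 : Nat) : Int) - 1 = ((0 : Nat) : Int) := by norm_num
      rw [this, PySem.List.pyGetD_natCast, h0c, PySem.List.pySetD_natCast,
          fwt_getD_set_self _ _ _ _ (by simp; omega)]
      simp)
    (by -- column 1 of the first N rows is untouched by the row-0 write
      intro j hj2
      have hrhs : PySem.List.pyGetD ((processes.take N).map (fun row => PySem.List.pyGetD row 1 0)) (j : Int) 0
          = PySem.List.pyGetD (processes.getD j []) 1 0 := by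
        rw [PySem.List.pyGetD_natCast]
        have hjlen : j < processes.length := by omega
        simp [List.getD, List.getElem?_map, hj2, List.getElem?_eq_getElem hjlen]
      rw [hrhs, h0c, PySem.List.pySetD_natCast, PySem.List.pyGetD_natCast]
      by_cases hj0 : j = 0
      · subst hj0
        rw [fwt_getD_set_self _ _ _ _ (by omega)]
        have h1 : (1 : Int) = ((1 : Nat) : Int) := by norm_num
        rw [h1, fwt_row_col _ _ _ _ (by omega), ← h1]
        rw [PySem.List.pyGetD_natCast]
      · rw [fwt_getD_set_ne _ _ _ _ _ hj0])
  simpa using main
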